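-- pv_equiv track=rewrite | github.com/saiteja1912/DSA | Basic/local_max_in_matrix.py | local_max_matrix
-- ===== SOURCE A (Python) =====
-- def local_max_matrix(l,n):
--     a=[[-1001]*(n-2) for _ in range(n-2)]
--     p,q=0,0
--     for i in range(1,n-1):
--         q=0
--         for j in range(1,n-1):
--             a[p][q]=max(l[i-1][j-1],l[i-1][j],l[i-1][j+1],l[i][j-1],l[i][j],l[i][j+1],l[i+1][j-1],l[i+1][j],l[i+1][j+1])
--             q+=1
--         p+=1
--     return a
-- ===== SOURCE B (Python) =====
-- def local_max_matrix(l, n):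
--     # separable two-pass max: horizontal 3-max table H, then vertical 3-max over H
--     if n <= 2:
--         return []
--     H = [[max(row[j - 1], row[j], row[j + 1]) for j in range(1, n - 1)] for row in l[:n]]
--     return [[max(H[i - 1][j], H[i][j], H[i + 1][j]) for j in range(n - 2)] for i in range(1, n - 1)]
-- ===== Notes on version B (the rewrite author's own statement) =====
-- stated objective: alternative
-- what changed: A fills a preallocated output with one 9-argument max per interior cell in nested index loops; B is a separable two-pass scheme that first materializes a horizontal 3-max table H over the rows of l[:n] and then takes vertical 3-maxes over H via comprehensions.
import Mathlib
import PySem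

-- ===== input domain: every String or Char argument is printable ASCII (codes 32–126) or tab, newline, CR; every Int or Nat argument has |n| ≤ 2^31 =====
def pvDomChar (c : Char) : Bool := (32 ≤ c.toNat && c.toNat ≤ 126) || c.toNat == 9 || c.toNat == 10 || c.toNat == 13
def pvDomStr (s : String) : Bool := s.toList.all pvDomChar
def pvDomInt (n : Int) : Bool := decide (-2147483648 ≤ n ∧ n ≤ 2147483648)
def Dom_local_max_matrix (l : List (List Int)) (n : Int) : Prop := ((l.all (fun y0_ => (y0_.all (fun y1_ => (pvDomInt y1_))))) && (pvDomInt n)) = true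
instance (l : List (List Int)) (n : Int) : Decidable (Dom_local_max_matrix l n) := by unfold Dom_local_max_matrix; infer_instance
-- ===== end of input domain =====

-- B replaces A's single 9-way max per cell by a separable two-pass scheme (a horizontal
-- 3-max table H over l[:n], then a vertical 3-max over H): a different decomposition, similar cost.


-- ===== PORT A =====
-- l[i][j] for the in-range indices A uses (Pre_ guarantees they are in range)
def pvGet (l : List (List Int)) (i j : Int) : Int :=
  PySem.List.pyGetD (PySem.List.pyGetD l i []) j 0

def local_max_matrix (l : List (List Int)) (n : Int) : List (List Int) :=
  let a0 := List.replicate (n-2).toNat (List.replicate (n-2).toNat (-1001 : Int))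
  -- p,q=0,0; for i in range(1,n-1): q=0; for j in range(1,n-1): a[p][q]=max(9 cells); q+=1 ;; p+=1
  (((PySem.List.pyRange 1 (n-1) 1).foldl (fun (st : List (List Int) × Nat) (i : Int) =>
      ((((PySem.List.pyRange 1 (n-1) 1).foldl
        (fun (st2 : List (List Int) × Nat) (j : Int) =>
          (st2.1.set st.2 ((st2.1.getD st.2 []).set st2.2
            (max (pvGet l (i-1) (j-1)) (max (pvGet l (i-1) j) (max (pvGet l (i-1) (j+1))
             (max (pvGet l i (j-1)) (max (pvGet l i j) (max (pvGet l i (j+1))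
             (max (pvGet l (i+1) (j-1)) (max (pvGet l (i+1) j) (pvGet l (i+1) (j+1))))))))))),
           st2.2 + 1))
        (st.1, 0)).1), st.2 + 1))
    (a0, 0)).1)

-- ===== PORT B =====
def local_max_matrix_alt (l : List (List Int)) (n : Int) : List (List Int) :=
  if n ≤ 2 then []
  else
    let H := (PySem.List.slice l none (some n)).map (fun row =>
      (PySem.List.pyRange 1 (n-1) 1).map (fun j =>
        max (PySem.List.pyGetD row (j-1) 0)
          (max (PySem.List.pyGetD row j 0) (PySem.List.pyGetD row (j+1) 0))))
    (PySem.List.pyRange 1 (n-1) 1).map (fun i =>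
      (PySem.List.pyRange 0 (n-2) 1).map (fun j =>
        max (PySem.List.pyGetD (PySem.List.pyGetD H (i-1) []) j 0)
          (max (PySem.List.pyGetD (PySem.List.pyGetD H i []) j 0)
            (PySem.List.pyGetD (PySem.List.pyGetD H (i+1) []) j 0))))

-- ===== PRECONDITION & SPEC =====
-- exactly where A returns: trivially for n ≤ 2, else rows 0..n-1 exist and each has ≥ n entries
def Pre_local_max_matrix (l : List (List Int)) (n : Int) : Prop :=
  n ≤ 2 ∨ (n ≤ (l.length : Int) ∧ ∀ row ∈ l.take n.toNat, n ≤ (row.length : Int))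
instance (l : List (List Int)) (n : Int) : Decidable (Pre_local_max_matrix l n) := by
  unfold Pre_local_max_matrix; infer_instance

def pvWitness_local_max_matrix : List (List Int) × Int :=
  ([[1,2,3],[4,5,6],[7,8,9]], 3)

def Spec_local_max_matrix (l : List (List Int)) (n : Int) (out : List (List Int)) : Prop := out = local_max_matrix_alt l n
instance (l : List (List Int)) (n : Int) (out : List (List Int)) : Decidable (Spec_local_max_matrix l n out) := by unfold Spec_local_max_matrix; infer_instance

-- ===== CLAIM (what is proved, stated in full; the proofs are below) =====
def Claim_equal_local_max_matrix : Prop := ∀ (l : List (List Int)) (n : Int), Dom_local_max_matrix l n → Pre_local_max_matrix l n → Spec_local_max_matrix l n (local_max_matrix l n)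

-- ===== LEMMAS AND PROOFS =====

-- A's 9-way max for the window centred at (i, j)
def pvCell (l : List (List Int)) (i j : Int) : Int :=
  max (pvGet l (i-1) (j-1)) (max (pvGet l (i-1) j) (max (pvGet l (i-1) (j+1))
   (max (pvGet l i (j-1)) (max (pvGet l i j) (max (pvGet l i (j+1))
   (max (pvGet l (i+1) (j-1)) (max (pvGet l (i+1) j) (pvGet l (i+1) (j+1)))))))))

theorem pvCell_split (l : List (List Int)) (i j : Int) :
    pvCell l i j =
      max (max (pvGet l (i-1) (j-1)) (max (pvGet l (i-1) j) (pvGet l (i-1) (j+1))))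
        (max (max (pvGet l i (j-1)) (max (pvGet l i j) (pvGet l i (j+1))))
          (max (pvGet l (i+1) (j-1)) (max (pvGet l (i+1) j) (pvGet l (i+1) (j+1))))) := by
  simp [pvCell, max_assoc]

-- row p of A's output
def pvRowF (l : List (List Int)) (n : Int) (k : Nat) : List Int :=
  (PySem.List.pyRange 1 (n-1) 1).map (fun j => pvCell l (1 + (k : Int)) j)

-- overwrite r[q], r[q+1], … with vs (what A's inner loop does to row p)
def pvWrite : List Int → Nat → List Int → List Int
  | r, _, [] => r
  | r, q, v :: vs => pvWrite (r.set q v) (q+1) vs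

theorem pvWrite_full : ∀ (vs r : List Int) (q : Nat), q + vs.length = r.length →
    pvWrite r q vs = r.take q ++ vs := by
  intro vs
  induction vs with
  | nil =>
    intro r q h
    simp only [List.length_nil, Nat.add_zero] at h
    simp [pvWrite, List.take_of_length_le (le_of_eq h.symm)]
  | cons v vs ih =>
    intro r q h
    simp only [List.length_cons] at h
    have hq : q < r.length := by omega
    rw [pvWrite, ih _ (q+1) (by simp; omega)]
    rw [List.set_eq_take_append_cons_drop, if_pos hq]
    have h1 : (r.take q).take (q+1) = r.take q :=
      List.take_of_length_le (by simp [List.length_take])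
    have h2 : q + 1 - (r.take q).length = 1 := by simp [List.length_take]; omega
    rw [List.take_append, h1, h2]
    simp

theorem pv_inner_fold (F : Int → Int) (p : Nat) :
    ∀ (js : List Int) (a : List (List Int)) (q : Nat),
    js.foldl (fun (st2 : List (List Int) × Nat) (j : Int) =>
        (st2.1.set p ((st2.1.getD p []).set st2.2 (F j)), st2.2 + 1)) (a, q)
      = (a.set p (pvWrite (a.getD p []) q (js.map F)), q + js.length) := by
  intro js
  induction js with
  | nil =>
    intro a q
    simp only [List.foldl_nil, List.map_nil, pvWrite, List.length_nil, Nat.add_zero]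
    by_cases hp : p < a.length
    · rw [List.getD_eq_getElem _ _ hp, List.set_getElem_self]
    · rw [List.set_eq_of_length_le (by omega)]
  | cons j js ih =>
    intro a q
    simp only [List.foldl_cons, ih, List.map_cons, List.length_cons]
    by_cases hp : p < a.length
    · rw [List.set_set, List.getD_eq_getElem _ _ (by simpa using hp),
        List.getElem_set_self, pvWrite]
      rw [List.getD_eq_getElem _ _ hp]
      exact Prod.ext rfl (by omega)
    · have hle : a.length ≤ p := by omega
      simp only [List.set_eq_of_length_le hle]
      exact Prod.ext rfl (by omega)

theorem pv_outer_fold (l : List (List Int)) (n : Int) :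
    ∀ (k : Nat), (k : Int) ≤ n - 2 →
    (PySem.List.pyRange 1 (1 + (k : Int)) 1).foldl
      (fun (st : List (List Int) × Nat) (i : Int) =>
        ((((PySem.List.pyRange 1 (n-1) 1).foldl
          (fun (st2 : List (List Int) × Nat) (j : Int) =>
            (st2.1.set st.2 ((st2.1.getD st.2 []).set st2.2 (pvCell l i j)), st2.2 + 1))
          (st.1, 0)).1), st.2 + 1))
      (List.replicate (n-2).toNat (List.replicate (n-2).toNat (-1001 : Int)), 0)
    = ((List.range k).map (pvRowF l n)
        ++ List.replicate ((n-2).toNat - k) (List.replicate (n-2).toNat (-1001 : Int)), k) := by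
  intro k
  induction k with
  | zero =>
    intro _
    rw [PySem.List.pyRange_one_eq_nil (a := 1) (b := 1 + ((0 : Nat) : Int)) (by omega)]
    simp
  | succ k ih =>
    intro hk
    have hk' : (k : Int) ≤ n - 2 := by push_cast at hk ⊢; omega
    have hkm : k < (n-2).toNat := by omega
    have hsplit : PySem.List.pyRange 1 (1 + ((k+1 : Nat) : Int)) 1
        = PySem.List.pyRange 1 (1 + (k : Int)) 1 ++ [1 + (k : Int)] := by
      have : (1 : Int) + ((k+1 : Nat) : Int) = (1 + (k : Int)) + 1 := by push_cast; ring
      rw [this, PySem.List.pyRange_one_succ_right (by omega)]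
    rw [hsplit, List.foldl_append, ih hk']
    simp only [List.foldl_cons, List.foldl_nil]
    -- the single step with i = 1 + k, p = k
    rw [pv_inner_fold (fun j => pvCell l (1 + (k : Int)) j) k]
    set m := (n-2).toNat with hm
    set P := (List.range k).map (pvRowF l n) with hP
    have hPlen : P.length = k := by simp [hP]
    have hrowk : (P ++ List.replicate (m - k) (List.replicate m (-1001 : Int))).getD k []
        = List.replicate m (-1001 : Int) := by
      rw [List.getD_eq_getElem _ _ (by simp [hPlen]; omega)]
      rw [List.getElem_append_right (by omega)]
      simp [hPlen]
    rw [hrowk]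
    have hlen : ((PySem.List.pyRange 1 (n-1) 1).map (fun j => pvCell l (1 + (k : Int)) j)).length
        = m := by
      simp [PySem.List.length_pyRange_one]; omega
    rw [pvWrite_full _ _ 0 (by simp [hlen])]
    simp only [List.take_zero, List.nil_append]
    refine Prod.ext ?_ rfl
    -- setting row k turns A_k into A_(k+1)
    obtain ⟨d, hd⟩ : ∃ d, m - k = d + 1 := ⟨m - k - 1, by omega⟩
    rw [hd, List.replicate_succ]
    rw [List.set_append, if_neg (by omega)]
    have hz : k - P.length = 0 := by omega
    rw [hz, List.set_cons_zero]
    rw [List.range_succ, List.map_append]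
    have hd' : m - (k+1) = d := by omega
    simp [hP, pvRowF, hd']

theorem pv_portA_eq (l : List (List Int)) (n : Int) :
    local_max_matrix l n = (List.range (n-2).toNat).map (pvRowF l n) := by
  show ((PySem.List.pyRange 1 (n-1) 1).foldl
    (fun (st : List (List Int) × Nat) (i : Int) =>
      ((((PySem.List.pyRange 1 (n-1) 1).foldl
        (fun (st2 : List (List Int) × Nat) (j : Int) =>
          (st2.1.set st.2 ((st2.1.getD st.2 []).set st2.2 (pvCell l i j)), st2.2 + 1))
        (st.1, 0)).1), st.2 + 1))
    (List.replicate (n-2).toNat (List.replicate (n-2).toNat (-1001 : Int)), 0)).1 = _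
  by_cases hn : n ≤ 2
  · have h0 : (n-2).toNat = 0 := by omega
    rw [PySem.List.pyRange_one_eq_nil (a := 1) (b := n-1) (by omega)]
    simp [h0]
  · have hrange : PySem.List.pyRange 1 (n-1) 1
        = PySem.List.pyRange 1 (1 + (((n-2).toNat : Nat) : Int)) 1 := by
      congr 1
      omega
    have h := pv_outer_fold l n (n-2).toNat (by omega)
    rw [← hrange] at h
    rw [h]
    simp

-- reading row r of B's horizontal-max table H at interior column t
theorem pv_hread (l : List (List Int)) (n : Int) (hl : n ≤ (l.length : Int))
    (r : Int) (t : Nat) (h0 : 0 ≤ r) (hrn : r < n) (ht : t < (n-2).toNat) :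
    PySem.List.pyGetD (PySem.List.pyGetD ((l.take n.toNat).map (fun row =>
        (PySem.List.pyRange 1 (n-1) 1).map (fun j =>
          max (PySem.List.pyGetD row (j-1) 0)
            (max (PySem.List.pyGetD row j 0) (PySem.List.pyGetD row (j+1) 0))))) r []) (t : Int) 0
      = max (pvGet l r (1+(t:Int)-1)) (max (pvGet l r (1+(t:Int))) (pvGet l r (1+(t:Int)+1))) := by
  rw [PySem.List.pyGetD_eq_getElem _ [] h0
    (by simp only [List.length_map, List.length_take]; push_cast; omega)]
  simp only [List.getElem_map, List.getElem_take]
  rw [PySem.List.pyGetD_map_pyRange_one _ 1 (n-1) t 0 (by omega)]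
  have hrow : PySem.List.pyGetD l r [] = l[r.toNat]'(by omega) :=
    PySem.List.pyGetD_eq_getElem l [] h0 (by omega)
  simp only [pvGet, hrow]

theorem pv_portB_eq (l : List (List Int)) (n : Int) (hn : 2 < n)
    (hl : n ≤ (l.length : Int)) :
    local_max_matrix_alt l n = (List.range (n-2).toNat).map (pvRowF l n) := by
  rw [local_max_matrix_alt, if_neg (by omega)]
  rw [PySem.List.slice_to l (by omega : (0:Int) ≤ n)]
  apply List.ext_getElem
  · simp [PySem.List.length_pyRange_one]
    omega
  intro k h1 h2
  have hkm : k < (n-2).toNat := by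
    rw [List.length_map, PySem.List.length_pyRange_one] at h1
    omega
  simp only [List.getElem_map, PySem.List.getElem_pyRange_one, List.getElem_range]
  unfold pvRowF
  apply List.ext_getElem
  · simp [PySem.List.length_pyRange_one]
    omega
  intro t ht1 ht2
  have htm : t < (n-2).toNat := by
    rw [List.length_map, PySem.List.length_pyRange_one] at ht1
    omega
  simp only [List.getElem_map, PySem.List.getElem_pyRange_one, zero_add]
  rw [pv_hread l n hl (1+(k:Int)-1) t (by omega) (by omega) htm]
  rw [pv_hread l n hl (1+(k:Int)) t (by omega) (by omega) htm]
  rw [pv_hread l n hl (1+(k:Int)+1) t (by omega) (by omega) htm]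
  rw [pvCell_split]

-- ===== VERDICT (by name: the statement is the Claim_ definition above) =====
theorem local_max_matrix_spec : Claim_equal_local_max_matrix := by
  intro l n _ hpre
  unfold Spec_local_max_matrix
  by_cases hn : n ≤ 2
  · rw [pv_portA_eq]
    rw [local_max_matrix_alt, if_pos hn]
    have h0 : (n-2).toNat = 0 := by omega
    simp [h0]
  · rcases hpre with h | ⟨hl, hr⟩
    · omega
    · rw [pv_portA_eq, pv_portB_eq l n (by omega) hl]
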